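-- pv_equiv track=rewrite | github.com/Rafaltor/yolov5-afam | tools.py | get_union_from_list
-- ===== SOURCE A (Python) =====
-- OPENING = +1
--
-- CLOSING = -1
--
-- class CoverQuery:
--     """Segment tree to maintain a set of integer intervals
--     and permitting to query the size of their union.
--     """
--
--     def __init__(self, L):
--         """creates a structure, where all possible intervals
--         will be included in [0, L - 1].
--         """
--         assert L != []  # L is assumed sorted
--         self.N = 1
--         while self.N < len(L):
--             self.N *= 2
--         self.c = [0] * (2 * self.N)  # --- covered
--         self.s = [0] * (2 * self.N)  # --- score
--         self.w = [0] * (2 * self.N)  # --- length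
--         for i, _ in enumerate(L):
--             self.w[self.N + i] = L[i]
--         for p in range(self.N - 1, 0, -1):
--             self.w[p] = self.w[2 * p] + self.w[2 * p + 1]
--
--     def cover(self):
--         """:returns: the size of the union of the stored intervals
--         """
--         return self.s[1]
--
--     def change(self, i, k, offset):
--         """when offset = +1, adds an interval [i, k],
--         when offset = -1, removes it
--         :complexity: O(log L)
--         """
--         self._change(1, 0, self.N, i, k, offset)
--
--     def _change(self, p, start, span, i, k, offset):
--         if start + span <= i or k <= start:  # --- disjoint
--             return
--         if i <= start and start + span <= k:  # --- included
--             self.c[p] += offset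
--         else:
--             self._change(2 * p, start, span // 2, i, k, offset)
--             self._change(2 * p + 1, start + span // 2, span // 2,
--                          i, k, offset)
--         if self.c[p] == 0:
--             if p >= self.N:  # --- leaf
--                 self.s[p] = 0
--             else:
--                 self.s[p] = self.s[2 * p] + self.s[2 * p + 1]
--         else:
--             self.s[p] = self.w[p]
--
-- def get_union_from_list(R):
--     """Area of union of rectangles
--     Source: https://github.com/jilljenn/tryalgo.
--     :param R: list of rectangles defined by (x1, y1, x2, y2)
--        where (x1, y1) is top left corner and (x2, y2) bottom right corner
--     :returns: area
--     :complexity: :math:`O(n \\log n)`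
--     """
--
--     if not R:  # segment tree would fail on an empty list
--         return 0
--     X = set()  # set of all x coordinates in the input
--     events = []  # events for the sweep line
--     for Rj in R:
--         (x1, y1, x2, y2) = Rj
--         assert x1 <= x2 and y1 <= y2
--         X.add(x1)
--         X.add(x2)
--         events.append((y1, OPENING, x1, x2))
--         events.append((y2, CLOSING, x1, x2))
--     i_to_x = list(sorted(X))
--     # inverse dictionary
--     x_to_i = {i_to_x[i]: i for i in range(len(i_to_x))}
--     L = [i_to_x[i + 1] - i_to_x[i] for i in range(len(i_to_x) - 1)]
--     C = CoverQuery(L)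
--     area = 0
--     previous_y = 0  # arbitrary initial value,
--     #                 because C.cover() is 0 at first iteration
--     for y, offset, x1, x2 in sorted(events):
--         area += (y - previous_y) * C.cover()
--         i1 = x_to_i[x1]
--         i2 = x_to_i[x2]
--         C.change(i1, i2, offset)
--         previous_y = y
--     return area
-- ===== SOURCE B (Python) =====
-- def get_union_from_list(R):
--     """Area of union of rectangles: sweep line over y-events, maintaining a
--     flat per-elementary-x-segment counter array instead of a segment tree."""
--     if not R:
--         return 0
--     events = []
--     for (x1, y1, x2, y2) in R:
--         assert x1 <= x2 and y1 <= y2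
--         events.append((y1, 1, x1, x2))
--         events.append((y2, -1, x1, x2))
--     xs = sorted({x for (x1, _, x2, _) in R for x in (x1, x2)})
--     index = {x: i for i, x in enumerate(xs)}
--     widths = [xs[i + 1] - xs[i] for i in range(len(xs) - 1)]
--     cnt = [0] * len(widths)
--     area = 0
--     prev_y = 0
--     for y, off, x1, x2 in sorted(events):
--         area += (y - prev_y) * sum(w for w, c in zip(widths, cnt) if c > 0)
--         for j in range(index[x1], index[x2]):
--             cnt[j] += off
--         prev_y = y
--     return area
-- ===== Notes on version B (the rewrite author's own statement) =====
-- stated objective: simpler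
-- what changed: The segment-tree CoverQuery is replaced by a flat per-elementary-x-segment counter array: each sweep event adds/subtracts 1 on a range of counters and the covered width is summed directly from segments with positive count.
import Mathlib
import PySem

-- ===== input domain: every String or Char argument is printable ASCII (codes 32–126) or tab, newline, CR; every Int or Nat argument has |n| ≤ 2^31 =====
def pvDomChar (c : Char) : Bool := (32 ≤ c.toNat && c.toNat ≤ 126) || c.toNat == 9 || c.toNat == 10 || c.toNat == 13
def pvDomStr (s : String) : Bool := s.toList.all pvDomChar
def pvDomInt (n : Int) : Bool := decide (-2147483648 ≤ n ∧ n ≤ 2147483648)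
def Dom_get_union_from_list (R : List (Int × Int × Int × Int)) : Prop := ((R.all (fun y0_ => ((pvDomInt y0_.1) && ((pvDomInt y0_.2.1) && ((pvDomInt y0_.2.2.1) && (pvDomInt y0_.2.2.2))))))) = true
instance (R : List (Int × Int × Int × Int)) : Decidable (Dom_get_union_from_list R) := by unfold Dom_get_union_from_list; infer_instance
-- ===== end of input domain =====

-- B replaces A's segment-tree CoverQuery by a flat per-elementary-x-segment counter array (simpler);
-- equivalence is about the return value (neither Python mutates its argument).

-- Python compares the event 4-tuples lexicographically; PySem.List.sorted needs an ordered key type,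
-- so the tuple sort is ported by hand as the same stable insertion sort PySem.List.sorted is defined by
-- (exact: stable insertion with the strict lexicographic 'before' = Python's sorted on tuples).
-- Both Pythons call sorted(events) on the same events, so both ports use this helper.
def pvEvLt (a b : Int × Int × Int × Int) : Bool :=
  a.1 < b.1 || (a.1 == b.1 && (a.2.1 < b.2.1 || (a.2.1 == b.2.1 &&
    (a.2.2.1 < b.2.2.1 || (a.2.2.1 == b.2.2.1 && a.2.2.2 < b.2.2.2)))))

def pvSortedEv (xs : List (Int × Int × Int × Int)) : List (Int × Int × Int × Int) :=
  xs.foldl (fun acc x => PySem.List.insertBy pvEvLt x acc) []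

-- ===== PORT A =====

-- 'self.N = 1; while self.N < len(L): self.N *= 2'  (the 0 < N test only makes the loop total; A calls it with N = 1)
def pvGrowN (N len : Int) : Int :=
  if h : 0 < N ∧ N < len then pvGrowN (2 * N) len else N
termination_by (len - N).toNat
decreasing_by omega

-- CoverQuery.__init__'s w array; the Python lists self.c/self.s/self.w are modelled as index
-- functions Int → Int (every Python read/write in this program is an in-range index, so the
-- models agree pointwise with the lists).
def pvCQw (L : List Int) (N : Int) : Int → Int :=
  let w0 : Int → Int := fun _ => 0
  -- for i, _ in enumerate(L): self.w[self.N + i] = L[i]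
  let w1 := (PySem.List.enumerate L).foldl
      (fun w p => Function.update w (N + p.1) (PySem.List.pyGetD L p.1 0)) w0
  -- for p in range(self.N - 1, 0, -1): self.w[p] = self.w[2*p] + self.w[2*p+1]
  (PySem.List.pyRange (N - 1) 0 (-1)).foldl
      (fun w p => Function.update w p (w (2 * p) + w (2 * p + 1))) w1

-- CoverQuery._change (mutates self.c, self.s; returned as a pair of index functions)
def pvChange (N : Int) (w : Int → Int) (cs : (Int → Int) × (Int → Int))
    (p start span i k off : Int) : (Int → Int) × (Int → Int) :=
  if start + span ≤ i ∨ k ≤ start then cs          -- disjoint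
  else
    let cs1 : (Int → Int) × (Int → Int) :=
      if i ≤ start ∧ start + span ≤ k then          -- included
        (Function.update cs.1 p (cs.1 p + off), cs.2)
      else
        pvChange N w
          (pvChange N w cs (2 * p) start (PySem.Int.floordiv span 2) i k off)
          (2 * p + 1) (start + PySem.Int.floordiv span 2) (PySem.Int.floordiv span 2) i k off
    if cs1.1 p = 0 then
      if N ≤ p then (cs1.1, Function.update cs1.2 p 0)                            -- leaf
      else (cs1.1, Function.update cs1.2 p (cs1.2 (2 * p) + cs1.2 (2 * p + 1)))
    else (cs1.1, Function.update cs1.2 p (w p))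
termination_by span.toNat
decreasing_by
  all_goals
    rw [PySem.Int.floordiv_eq_ediv_of_pos (by omega : (0:Int) < 2)]
    omega

def get_union_from_list (R : List (Int × Int × Int × Int)) : Int :=
  if R = [] then 0
  else
    -- for Rj in R: X.add(x1); X.add(x2); events.append((y1, OPENING, x1, x2)); events.append((y2, CLOSING, x1, x2))
    let XE := R.foldl
      (fun (st : PySem.Set Int × List (Int × Int × Int × Int)) Rj =>
        (PySem.Set.add (PySem.Set.add st.1 Rj.1) Rj.2.2.1,
         st.2 ++ [(Rj.2.1, 1, Rj.1, Rj.2.2.1)] ++ [(Rj.2.2.2, -1, Rj.1, Rj.2.2.1)]))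
      (PySem.Set.empty, [])
    let i_to_x := PySem.List.sorted XE.1 (fun x => x)
    -- x_to_i = {i_to_x[i]: i for i in range(len(i_to_x))}
    let x_to_i := (PySem.List.pyRange 0 (PySem.List.len i_to_x)).foldl
      (fun d i => d.insert (PySem.List.pyGetD i_to_x i 0) i) PySem.Dict.empty
    let L := (PySem.List.pyRange 0 (PySem.List.len i_to_x - 1)).map
      (fun i => PySem.List.pyGetD i_to_x (i + 1) 0 - PySem.List.pyGetD i_to_x i 0)
    let N := pvGrowN 1 (PySem.List.len L)
    let w := pvCQw L N
    let fin := (pvSortedEv XE.2).foldl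
      (fun (acc : Int × Int × ((Int → Int) × (Int → Int))) e =>
        let area := acc.1 + (e.1 - acc.2.1) * acc.2.2.2 1      -- C.cover() = self.s[1]
        let i1 := (x_to_i.get? e.2.2.1).getD 0                 -- x_to_i[x1]: key always present
        let i2 := (x_to_i.get? e.2.2.2).getD 0
        (area, e.1, pvChange N w acc.2.2 1 0 N i1 i2 e.2.1))
      (0, 0, (fun _ => 0, fun _ => 0))
    fin.1

-- ===== PORT B =====

def get_union_from_list_alt (R : List (Int × Int × Int × Int)) : Int :=
  if R = [] then 0
  else
    let events := R.flatMap (fun r => [(r.2.1, 1, r.1, r.2.2.1), (r.2.2.2, -1, r.1, r.2.2.1)])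
    let xs := PySem.List.sorted
      (PySem.Set.ofList (R.flatMap (fun r => [r.1, r.2.2.1]))) (fun x => x)
    -- index = {x: i for i, x in enumerate(xs)}
    let index := (PySem.List.enumerate xs).foldl
      (fun d p => d.insert p.2 p.1) PySem.Dict.empty
    let widths := (PySem.List.pyRange 0 (PySem.List.len xs - 1)).map
      (fun i => PySem.List.pyGetD xs (i + 1) 0 - PySem.List.pyGetD xs i 0)
    -- cnt = [0] * len(widths), modelled as an index function Int → Int (all accesses in range)
    let fin := (pvSortedEv events).foldl
      (fun (acc : Int × Int × (Int → Int)) e =>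
        -- sum(w for w, c in zip(widths, cnt) if c > 0)
        let cover := widths.zipIdx.foldl
          (fun t wj => if acc.2.2 (wj.2 : Int) > 0 then t + wj.1 else t) 0
        let area := acc.1 + (e.1 - acc.2.1) * cover
        let i1 := (index.get? e.2.2.1).getD 0
        let i2 := (index.get? e.2.2.2).getD 0
        (area, e.1,
          -- for j in range(index[x1], index[x2]): cnt[j] += off
          (PySem.List.pyRange i1 i2).foldl
            (fun c j => Function.update c j (c j + e.2.1)) acc.2.2))
      (0, 0, fun _ => 0)
    fin.1

-- ===== PRECONDITION & SPEC =====
-- Pre_ excludes exactly the inputs on which the Python A raises AssertionError: a rectangle with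
-- x1 > x2 or y1 > y2 ('assert x1 <= x2 and y1 <= y2', where B's identical assert also raises), and
-- non-empty inputs whose rectangles all share one single x-coordinate (CoverQuery's
-- 'assert L != []'; on those B naturally returns 0 — zero elementary widths, zero area).
def Pre_get_union_from_list (R : List (Int × Int × Int × Int)) : Prop :=
  (∀ r ∈ R, r.1 ≤ r.2.2.1 ∧ r.2.1 ≤ r.2.2.2) ∧
  (R = [] ∨ ∃ r ∈ R, r.1 ≠ (R.headD (0, 0, 0, 0)).1 ∨ r.2.2.1 ≠ (R.headD (0, 0, 0, 0)).1)
instance (R : List (Int × Int × Int × Int)) : Decidable (Pre_get_union_from_list R) := by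
  unfold Pre_get_union_from_list; infer_instance

def pvWitness_get_union_from_list : (List (Int × Int × Int × Int)) := [(0, 0, 2, 3)]


def Spec_get_union_from_list (R : List (Int × Int × Int × Int)) (out : Int) : Prop := out = get_union_from_list_alt R
instance (R : List (Int × Int × Int × Int)) (out : Int) : Decidable (Spec_get_union_from_list R out) := by unfold Spec_get_union_from_list; infer_instance

-- ===== CLAIM (what is proved, stated in full; the proofs are below) =====
def Claim_equal_get_union_from_list : Prop := ∀ (R : List (Int × Int × Int × Int)), Dom_get_union_from_list R → Pre_get_union_from_list R → Spec_get_union_from_list R (get_union_from_list R)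

-- ===== LEMMAS AND PROOFS =====

-- subtree membership: q is in the subtree of node p
def pvInSub (p q : Int) : Prop := ∃ (j : Nat) (r : Int), q = 2 ^ j * p + r ∧ 0 ≤ r ∧ r < 2 ^ j

-- canonical decomposition indicator of interval [i,k) from node (p, st, sp)
def pvDec (p st sp i k q : Int) : Int :=
  if st + sp ≤ i ∨ k ≤ st then 0
  else if i ≤ st ∧ st + sp ≤ k then (if q = p then 1 else 0)
  else
    pvDec (2 * p) st (PySem.Int.floordiv sp 2) i k q +
    pvDec (2 * p + 1) (st + PySem.Int.floordiv sp 2) (PySem.Int.floordiv sp 2) i k q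
termination_by sp.toNat
decreasing_by
  all_goals
    rw [PySem.Int.floordiv_eq_ediv_of_pos (by omega : (0:Int) < 2)]
    omega

-- the value the s-array holds at p, as a function of c and w
def pvMF (N : Int) (w c : Int → Int) (p : Int) : Int :=
  if p ≤ 0 then 0
  else if c p = 0 then
    (if N ≤ p then 0 else pvMF N w c (2 * p) + pvMF N w c (2 * p + 1))
  else w p
termination_by (2 * N - p).toNat
decreasing_by all_goals omega

-- sum of c along the ancestor chain from ℓ up to p
def pvAnc (c : Int → Int) (l p : Int) : Int :=
  if l ≤ 0 ∨ l < p then 0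
  else if l = p then c p
  else c l + pvAnc c (l / 2) p
termination_by l.toNat
decreasing_by omega

-- leaf weights / the intended content of the w array
def pvWleaf (L : List Int) (N q : Int) : Int :=
  if N ≤ q ∧ q < N + L.length then PySem.List.pyGetD L (q - N) 0 else 0

def pvWS (L : List Int) (N q : Int) : Int :=
  if q ≤ 0 then 0
  else if N ≤ q then pvWleaf L N q
  else pvWS L N (2 * q) + pvWS L N (2 * q + 1)
termination_by (2 * N - q).toNat
decreasing_by all_goals omega

-- a consistent (node, start, span) triple for tree size N
def pvCons (N p st sp : Int) : Prop :=
  0 < p ∧ 0 ≤ st ∧ (∃ d : Nat, sp = 2 ^ d) ∧ sp * p = N + st ∧ st + sp ≤ N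


theorem pvInSub_refl (p : Int) : pvInSub p p := ⟨0, 0, by ring, le_refl _, by norm_num⟩

theorem pvInSub_child_l {p q : Int} (h : pvInSub (2 * p) q) : pvInSub p q := by
  obtain ⟨j, r, hq, h0, h1⟩ := h
  refine ⟨j + 1, r, by rw [hq]; ring, h0, ?_⟩
  have h2 : (2:Int)^(j+1) = 2 * 2^j := by ring
  omega

theorem pvInSub_child_r {p q : Int} (h : pvInSub (2 * p + 1) q) : pvInSub p q := by
  obtain ⟨j, r, hq, h0, h1⟩ := h
  refine ⟨j + 1, 2 ^ j + r, by rw [hq]; ring, by positivity, ?_⟩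
  have : (2:Int)^(j+1) = 2 * 2^j := by ring
  omega

theorem pvInSub_le {p q : Int} (hp : 0 < p) (h : pvInSub p q) : p ≤ q := by
  obtain ⟨j, r, hq, h0, h1⟩ := h
  have h2 : (1:Int) ≤ 2 ^ j := one_le_pow₀ (by norm_num)
  nlinarith

theorem pvInSub_split {p q : Int} (hp : 0 < p) (h : pvInSub p q) :
    q = p ∨ pvInSub (2 * p) q ∨ pvInSub (2 * p + 1) q := by
  obtain ⟨j, r, hq, h0, h1⟩ := h
  cases j with
  | zero => left; simp at h1 ⊢; omega
  | succ j =>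
    right
    have hpow : (2:Int)^(j+1) = 2 * 2^j := by ring
    by_cases hr : r < 2 ^ j
    · left; exact ⟨j, r, by rw [hq]; ring, h0, hr⟩
    · right
      refine ⟨j, r - 2 ^ j, by rw [hq]; ring, by omega, by omega⟩

theorem pvInSub_disj {p q : Int} (hp : 0 < p)
    (hl : pvInSub (2 * p) q) (hr : pvInSub (2 * p + 1) q) : False := by
  obtain ⟨a, r, hq, h0, h1⟩ := hl
  obtain ⟨b, r', hq', h0', h1'⟩ := hr
  rcases le_or_gt a b with hab | hab
  · -- q < 2^a(2p+1) ≤ 2^b(2p+1) ≤ q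
    have h2 : (2:Int)^a ≤ 2^b := pow_le_pow_right₀ (by norm_num) hab
    nlinarith
  · -- q ≥ 2^a·2p ≥ 2^(b+1)·2p ≥ 2^b(2p+2) > q
    have hab' : b + 1 ≤ a := hab
    have h2 : (2:Int)^(b+1) ≤ 2^a := pow_le_pow_right₀ (by norm_num) hab'
    have h3 : (2:Int)^(b+1) = 2 * 2^b := by ring
    nlinarith [pow_pos (by norm_num : (0:Int) < 2) b]

theorem pvInSub_half {p q : Int} (hp : 0 < p) (h : pvInSub p q) (hne : q ≠ p) :
    pvInSub p (q / 2) := by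
  obtain ⟨j, r, hq, h0, h1⟩ := h
  cases j with
  | zero => simp at h1; omega
  | succ j =>
    have hpow : (2:Int)^(j+1) = 2 * 2^j := by ring
    refine ⟨j, r / 2, ?_, by omega, by omega⟩
    have : q = 2 * (2 ^ j * p) + r := by rw [hq]; ring
    omega

theorem pvInSub_trans {a b c : Int} (h1 : pvInSub a b) (h2 : pvInSub b c) : pvInSub a c := by
  obtain ⟨i, r', hb, hr0', hr1'⟩ := h1
  obtain ⟨j, r, hc, hr0, hr1⟩ := h2
  refine ⟨j + i, 2 ^ j * r' + r, ?_, by positivity, ?_⟩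
  · rw [hc, hb]; ring
  · have h3 : (2:Int) ^ j * r' ≤ 2 ^ j * (2 ^ i - 1) := by
      apply mul_le_mul_of_nonneg_left (by omega) (by positivity)
    have h4 : (2:Int) ^ (j + i) = 2 ^ j * 2 ^ i := by rw [pow_add]
    nlinarith
theorem pvInSub_one {q : Int} (hq : 0 < q) : pvInSub 1 q := by
  have hne : q.toNat ≠ 0 := by omega
  have h1 := Nat.log2_self_le hne
  have h2 := Nat.lt_log2_self (n := q.toNat)
  refine ⟨q.toNat.log2, q - 2 ^ q.toNat.log2, by ring, ?_, ?_⟩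
  · have : ((2:Nat) ^ q.toNat.log2 : Int) ≤ (q.toNat : Int) := by exact_mod_cast h1
    push_cast at this ⊢; omega
  · have : ((q.toNat : Int)) < ((2:Nat) ^ (q.toNat.log2 + 1) : Int) := by exact_mod_cast h2
    push_cast at this ⊢
    have h3 : (2:Int) ^ (q.toNat.log2 + 1) = 2 * 2 ^ q.toNat.log2 := by ring
    omega
theorem pvInSub_parent {l : Int} (hl : 0 < l) : pvInSub (l / 2) l := by
  rcases Int.even_or_odd l with ⟨m, hm⟩ | ⟨m, hm⟩
  · have h2 : l / 2 = m := by omega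
    have h3 : l = 2 * m := by omega
    rw [h2, h3]; exact pvInSub_child_l (pvInSub_refl _)
  · have h2 : l / 2 = m := by omega
    have h3 : l = 2 * m + 1 := by omega
    rw [h2, h3]; exact pvInSub_child_r (pvInSub_refl _)

theorem pvCons_root {N : Int} (hN : 0 < N) (ht : ∃ t : Nat, N = 2 ^ t) : pvCons N 1 0 N :=
  ⟨by norm_num, le_refl _, ht, by omega, by omega⟩

theorem pvCons_sp_pos {N p st sp : Int} (h : pvCons N p st sp) : 0 < sp := by
  obtain ⟨_, _, ⟨d, rfl⟩, _, _⟩ := h; positivity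

theorem pvCons_leaf_iff {N p st sp : Int} (h : pvCons N p st sp) : N ≤ p ↔ sp = 1 := by
  obtain ⟨hp, hst, ⟨d, rfl⟩, heq, hle⟩ := h
  constructor
  · intro hNp
    by_contra hne
    have hd : 1 ≤ d := by
      rcases Nat.eq_zero_or_pos d with h0 | h1
      · subst h0; simp at hne
      · exact h1
    have h2 : (2:Int) ≤ 2 ^ d := by
      calc (2:Int) = 2^1 := by norm_num
      _ ≤ 2^d := pow_le_pow_right₀ (by norm_num) hd
    have h3 : 2 * p ≤ 2 ^ d * p := mul_le_mul_of_nonneg_right h2 (by omega)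
    omega
  · intro h1
    rw [h1] at heq hle; omega

theorem pvCons_leaf_eq {N p st sp : Int} (h : pvCons N p st sp) (hsp : sp = 1) : p = N + st := by
  obtain ⟨_, _, _, heq, _⟩ := h; rw [hsp] at heq; omega

theorem pvCons_child_l {N p st sp : Int} (h : pvCons N p st sp) (h2 : 2 ≤ sp) :
    pvCons N (2 * p) st (sp / 2) := by
  obtain ⟨hp, hst, ⟨d, rfl⟩, heq, hle⟩ := h
  have hd : 1 ≤ d := by
    rcases Nat.eq_zero_or_pos d with h0 | h1
    · subst h0; norm_num at h2
    · exact h1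
  have hpow : (2:Int) ^ d = 2 * 2 ^ (d - 1) := by
    rw [← pow_succ']; congr 1; omega
  have hdiv : (2:Int) ^ d / 2 = 2 ^ (d - 1) := by omega
  refine ⟨by omega, hst, ⟨d - 1, hdiv⟩, ?_, by omega⟩
  rw [hdiv]
  nlinarith [heq]

theorem pvCons_child_r {N p st sp : Int} (h : pvCons N p st sp) (h2 : 2 ≤ sp) :
    pvCons N (2 * p + 1) (st + sp / 2) (sp / 2) := by
  obtain ⟨hp, hst, ⟨d, rfl⟩, heq, hle⟩ := h
  have hd : 1 ≤ d := by
    rcases Nat.eq_zero_or_pos d with h0 | h1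
    · subst h0; norm_num at h2
    · exact h1
  have hpow : (2:Int) ^ d = 2 * 2 ^ (d - 1) := by
    rw [← pow_succ']; congr 1; omega
  have hdiv : (2:Int) ^ d / 2 = 2 ^ (d - 1) := by omega
  refine ⟨by omega, by omega, ⟨d - 1, hdiv⟩, ?_, by omega⟩
  rw [hdiv]
  nlinarith [heq]

theorem pvLeafSub {N p st sp j : Int} (h : pvCons N p st sp) (h1 : st ≤ j) (h2 : j < st + sp) :
    pvInSub p (N + j) := by
  obtain ⟨hp, hst, ⟨d, rfl⟩, heq, hle⟩ := h
  exact ⟨d, j - st, by omega, by omega, by omega⟩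

theorem pvAnc_zero (l p : Int) : pvAnc (fun _ => 0) l p = 0 := by
  generalize hn : l.toNat = n
  induction n using Nat.strong_induction_on generalizing l with
  | _ n ih =>
    rw [pvAnc.eq_def]
    split_ifs with h1 h2
    · rfl
    · rfl
    · rw [ih (l / 2).toNat (by omega) _ rfl]; ring

theorem pvAnc_add (c1 c2 : Int → Int) (l p : Int) :
    pvAnc (fun q => c1 q + c2 q) l p = pvAnc c1 l p + pvAnc c2 l p := by
  generalize hn : l.toNat = n
  induction n using Nat.strong_induction_on generalizing l with
  | _ n ih =>
    rw [pvAnc.eq_def (c := fun q => c1 q + c2 q) (l := l) (p := p),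
        pvAnc.eq_def (c := c1) (l := l) (p := p), pvAnc.eq_def (c := c2) (l := l) (p := p)]
    split_ifs with h1 h2
    · ring
    · rfl
    · rw [ih (l / 2).toNat (by omega) _ rfl]; ring

theorem pvAnc_listsum {α : Type} (E : List α) (f : α → Int → Int) (l p : Int) :
    pvAnc (fun q => (E.map (fun e => f e q)).sum) l p = (E.map (fun e => pvAnc (f e) l p)).sum := by
  induction E with
  | nil => simpa using pvAnc_zero l p
  | cons e E ih =>
    have h : (fun q => (((e :: E).map (fun e => f e q)).sum)) =
        (fun q => f e q + (E.map (fun e => f e q)).sum) := by funext q; simp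
    rw [h, pvAnc_add, ih]; simp

theorem pvAnc_congr {c1 c2 : Int → Int} {l p : Int} (hp : 0 < p) (hsub : pvInSub p l)
    (H : ∀ r, pvInSub p r → pvInSub r l → c1 r = c2 r) : pvAnc c1 l p = pvAnc c2 l p := by
  generalize hn : l.toNat = n
  induction n using Nat.strong_induction_on generalizing l with
  | _ n ih =>
    rw [pvAnc.eq_def (c := c1) (l := l) (p := p), pvAnc.eq_def (c := c2) (l := l) (p := p)]
    split_ifs with h1 h2
    · rfl
    · exact H p (pvInSub_refl p) (h2 ▸ pvInSub_refl l)
    · rw [H l hsub (pvInSub_refl l),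
          ih (l / 2).toNat (by omega) (pvInSub_half hp hsub h2)
            (fun r hr1 hr2 => H r hr1 (pvInSub_trans hr2 (pvInSub_parent (by omega)))) rfl]

theorem pvAnc_ind {p l : Int} (a : Int) (hp : 0 < p) (hsub : pvInSub p l) :
    pvAnc (fun r => if r = p then a else 0) l p = a := by
  generalize hn : l.toNat = n
  induction n using Nat.strong_induction_on generalizing l with
  | _ n ih =>
    have hle : p ≤ l := pvInSub_le hp hsub
    rw [pvAnc.eq_def]
    split_ifs with h1 h2 h3
    · omega
    · rfl
    · exact absurd rfl h3
    · rw [ih (l / 2).toNat (by omega) (pvInSub_half hp hsub h2) rfl]; ring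

theorem pvAnc_shift {c : Int → Int} {p ch l : Int} (hp : 0 < p)
    (hch : ch = 2 * p ∨ ch = 2 * p + 1) (hsub : pvInSub ch l) :
    pvAnc c l p = pvAnc c l ch + c p := by
  generalize hn : l.toNat = n
  induction n using Nat.strong_induction_on generalizing l with
  | _ n ih =>
    have hchpos : 0 < ch := by omega
    have hle : ch ≤ l := pvInSub_le hchpos hsub
    by_cases he : l = ch
    · subst he
      rw [pvAnc.eq_def (c := c) (l := l) (p := p), if_neg (by omega), if_neg (by omega)]
      rw [pvAnc.eq_def (c := c) (l := l) (p := l), if_neg (by omega), if_pos rfl]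
      have h2 : l / 2 = p := by omega
      rw [h2, pvAnc.eq_def, if_neg (by omega), if_pos rfl]
    · rw [pvAnc.eq_def (c := c) (l := l) (p := p), if_neg (by omega), if_neg (by omega)]
      rw [pvAnc.eq_def (c := c) (l := l) (p := ch), if_neg (by omega), if_neg he]
      rw [ih (l / 2).toNat (by omega) (pvInSub_half hchpos hsub he) rfl]
      ring

theorem pvAnc_ge_cp {c : Int → Int} {p l : Int} (hp : 0 < p) (hsub : pvInSub p l)
    (hc : ∀ r, 0 ≤ c r) : c p ≤ pvAnc c l p := by
  generalize hn : l.toNat = n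
  induction n using Nat.strong_induction_on generalizing l with
  | _ n ih =>
    have hle : p ≤ l := pvInSub_le hp hsub
    rw [pvAnc.eq_def]
    split_ifs with h1 h2
    · omega
    · exact le_refl _
    · have h3 := ih (l / 2).toNat (by omega) (pvInSub_half hp hsub h2) rfl
      have h4 := hc l
      omega
theorem pvDec_support {p st sp i k q : Int} (h : pvDec p st sp i k q ≠ 0) : pvInSub p q := by
  generalize hn : sp.toNat = n
  induction n using Nat.strong_induction_on generalizing p st sp with
  | _ n ih =>
    rw [pvDec.eq_def] at h
    split_ifs at h with h1 h2 hqp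
    · exact absurd rfl h
    · exact hqp ▸ pvInSub_refl p
    · exact absurd rfl h
    · have hsp : 2 ≤ sp := by omega
      rw [PySem.Int.floordiv_eq_ediv_of_pos (by norm_num : (0:Int) < 2)] at h
      rcases Decidable.em (pvDec (2 * p) st (sp / 2) i k q = 0) with h0 | h0
      · have h1' : pvDec (2 * p + 1) (st + sp / 2) (sp / 2) i k q ≠ 0 := by
          intro hz; rw [h0, hz] at h; exact h rfl
        exact pvInSub_child_r (ih (sp / 2).toNat (by omega) h1' rfl)
      · exact pvInSub_child_l (ih (sp / 2).toNat (by omega) h0 rfl)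

theorem pvDec_nonneg (p st sp i k q : Int) : 0 ≤ pvDec p st sp i k q := by
  generalize hn : sp.toNat = n
  induction n using Nat.strong_induction_on generalizing p st sp with
  | _ n ih =>
    rw [pvDec.eq_def]
    split_ifs with h1 h2 h3
    · exact le_refl _
    · norm_num
    · exact le_refl _
    · have hsp : 2 ≤ sp := by omega
      rw [PySem.Int.floordiv_eq_ediv_of_pos (by norm_num : (0:Int) < 2)]
      have a1 := ih (sp / 2).toNat (by omega) (2 * p) st (sp / 2) rfl
      have a2 := ih (sp / 2).toNat (by omega) (2 * p + 1) (st + sp / 2) (sp / 2) rfl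
      omega
theorem pvDec_at_node {p st sp i k : Int} (hp : 0 < p) : pvDec (2 * p) st sp i k p = 0 := by
  by_contra h
  have := pvInSub_le (by omega) (pvDec_support h)
  omega

theorem pvDec_at_node' {p st sp i k : Int} (hp : 0 < p) : pvDec (2 * p + 1) st sp i k p = 0 := by
  by_contra h
  have := pvInSub_le (by omega) (pvDec_support h)
  omega

theorem pvAnc_sub_zero {c : Int → Int} {ch l : Int} (hch : 0 < ch) (hsub : pvInSub ch l)
    (hz : ∀ r, pvInSub ch r → c r = 0) : pvAnc c l ch = 0 := by
  rw [pvAnc_congr (c2 := fun _ => 0) hch hsub (fun r hr _ => hz r hr), pvAnc_zero]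

theorem pvAncDec {N p st sp i k j : Int} (hN : 0 < N) (hc : pvCons N p st sp)
    (h1 : st ≤ j) (h2 : j < st + sp) :
    pvAnc (pvDec p st sp i k) (N + j) p = if i ≤ j ∧ j < k then 1 else 0 := by
  generalize hn : sp.toNat = n
  induction n using Nat.strong_induction_on generalizing p st sp j with
  | _ n ih =>
    obtain ⟨hp, hst, hpow, heq, hle⟩ := hc
    have hspp : 0 < sp := pvCons_sp_pos ⟨hp, hst, hpow, heq, hle⟩
    have hin : pvInSub p (N + j) := pvLeafSub ⟨hp, hst, hpow, heq, hle⟩ h1 h2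
    by_cases hd : st + sp ≤ i ∨ k ≤ st
    · have hfun : (pvDec p st sp i k ·) = (fun _ => (0:Int)) := by
        funext q; rw [pvDec.eq_def, if_pos hd]
      rw [show pvDec p st sp i k = (pvDec p st sp i k ·) from rfl, hfun, pvAnc_zero,
          if_neg (by omega)]
    · by_cases hi : i ≤ st ∧ st + sp ≤ k
      · have hfun : (pvDec p st sp i k ·) = (fun q => if q = p then (1:Int) else 0) := by
          funext q; rw [pvDec.eq_def, if_neg hd, if_pos hi]
        rw [show pvDec p st sp i k = (pvDec p st sp i k ·) from rfl, hfun,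
            pvAnc_ind 1 hp hin, if_pos (by omega)]
      · have hsp : 2 ≤ sp := by omega
        have hfun : (pvDec p st sp i k ·) = (fun q =>
            pvDec (2 * p) st (sp / 2) i k q + pvDec (2 * p + 1) (st + sp / 2) (sp / 2) i k q) := by
          funext q
          rw [pvDec.eq_def, if_neg hd, if_neg hi,
              PySem.Int.floordiv_eq_ediv_of_pos (by norm_num : (0:Int) < 2)]
        rw [show pvDec p st sp i k = (pvDec p st sp i k ·) from rfl, hfun, pvAnc_add]
        have hcl := pvCons_child_l ⟨hp, hst, hpow, heq, hle⟩ hsp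
        have hcr := pvCons_child_r ⟨hp, hst, hpow, heq, hle⟩ hsp
        have hsp2 : 0 < sp / 2 := pvCons_sp_pos hcl
        have hsp2' : sp / 2 < sp := by omega
        have hdvd : 2 ∣ sp := by
          obtain ⟨d, hd⟩ := hpow
          rcases Nat.eq_zero_or_pos d with h0 | h0
          · subst h0; norm_num at hd; omega
          · exact ⟨2 ^ (d - 1), by rw [hd, ← pow_succ']; congr 1; omega⟩
        by_cases hj : j < st + sp / 2
        · have hsubl : pvInSub (2 * p) (N + j) := pvLeafSub hcl h1 hj
          rw [pvAnc_shift hp (Or.inl rfl) hsubl, pvAnc_shift hp (Or.inl rfl) hsubl,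
              pvDec_at_node hp, pvDec_at_node' hp,
              ih (sp / 2).toNat (by omega) hcl h1 hj rfl,
              pvAnc_sub_zero (by omega) hsubl
                (fun r hr => by
                  by_contra hz
                  exact pvInSub_disj hp hr (pvDec_support hz))]
          ring
        · have hj1 : st + sp / 2 ≤ j := by omega
          have hj2 : j < st + sp / 2 + sp / 2 := by omega
          have hsubr : pvInSub (2 * p + 1) (N + j) := pvLeafSub hcr hj1 hj2
          rw [pvAnc_shift hp (Or.inr rfl) hsubr, pvAnc_shift hp (Or.inr rfl) hsubr,
              pvDec_at_node hp, pvDec_at_node' hp,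
              ih (sp / 2).toNat (by omega) hcr hj1 hj2 rfl,
              pvAnc_sub_zero (by omega) hsubr
                (fun r hr => by
                  by_contra hz
                  exact pvInSub_disj hp (pvDec_support hz) hr)]
          ring
theorem pvMF_congr_c {N : Int} {w c1 c2 : Int → Int} {p : Int}
    (H : ∀ r, pvInSub p r → c1 r = c2 r) : pvMF N w c1 p = pvMF N w c2 p := by
  generalize hn : (2 * N - p).toNat = n
  induction n using Nat.strong_induction_on generalizing p with
  | _ n ih =>
    have hceq : c1 p = c2 p := H p (pvInSub_refl p)
    rw [pvMF.eq_def (c := c1), pvMF.eq_def (c := c2), hceq]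
    split_ifs with hp hc hN
    · rfl
    · rfl
    · rw [ih (2 * N - 2 * p).toNat (by omega) (fun r hr => H r (pvInSub_child_l hr)) rfl,
          ih (2 * N - (2 * p + 1)).toNat (by omega) (fun r hr => H r (pvInSub_child_r hr)) rfl]
    · rfl

theorem pvMF_congr_w {N : Int} {w1 w2 c : Int → Int} {p : Int}
    (H : ∀ q, 0 < q → w1 q = w2 q) : pvMF N w1 c p = pvMF N w2 c p := by
  generalize hn : (2 * N - p).toNat = n
  induction n using Nat.strong_induction_on generalizing p with
  | _ n ih =>
    rw [pvMF.eq_def (w := w1), pvMF.eq_def (w := w2)]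
    split_ifs with hp hc hN
    · rfl
    · rfl
    · rw [ih (2 * N - 2 * p).toNat (by omega) (p := 2 * p) rfl,
          ih (2 * N - (2 * p + 1)).toNat (by omega) (p := 2 * p + 1) rfl]
    · exact H p (by omega)

theorem pvMF_zero (N : Int) (w : Int → Int) (p : Int) : pvMF N w (fun _ => 0) p = 0 := by
  generalize hn : (2 * N - p).toNat = n
  induction n using Nat.strong_induction_on generalizing p with
  | _ n ih =>
    rw [pvMF.eq_def]
    split_ifs with hp hc hN
    · rfl
    · rfl
    · rw [ih (2 * N - 2 * p).toNat (by omega) (2 * p) rfl,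
          ih (2 * N - (2 * p + 1)).toNat (by omega) (2 * p + 1) rfl]
      norm_num
    · exact absurd rfl hc

theorem pvWSum {L : List Int} {N p st sp : Int} (hN : 0 < N) (hc : pvCons N p st sp) :
    pvWS L N p = ((PySem.List.pyRange st (st + sp)).map (fun j => pvWleaf L N (N + j))).sum := by
  generalize hn : sp.toNat = n
  induction n using Nat.strong_induction_on generalizing p st sp with
  | _ n ih =>
    obtain ⟨hp, hst, hpow, heq, hle⟩ := hc
    have hspp : 0 < sp := pvCons_sp_pos ⟨hp, hst, hpow, heq, hle⟩
    by_cases hsp : sp = 1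
    · have hpe : p = N + st := pvCons_leaf_eq ⟨hp, hst, hpow, heq, hle⟩ hsp
      rw [pvWS.eq_def, if_neg (by omega), if_pos (by omega), hsp,
          show st + 1 = st + 1 from rfl, PySem.List.pyRange_one_singleton]
      simp [hpe]
    · have hsp2 : 2 ≤ sp := by omega
      have hcl := pvCons_child_l ⟨hp, hst, hpow, heq, hle⟩ hsp2
      have hcr := pvCons_child_r ⟨hp, hst, hpow, heq, hle⟩ hsp2
      have hdvd : 2 ∣ sp := by
        obtain ⟨d, hd⟩ := hpow
        rcases Nat.eq_zero_or_pos d with h0 | h0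
        · subst h0; norm_num at hd; omega
        · exact ⟨2 ^ (d - 1), by rw [hd, ← pow_succ']; congr 1; omega⟩
      have hNp : ¬ N ≤ p := by
        rw [pvCons_leaf_iff ⟨hp, hst, hpow, heq, hle⟩]; omega
      rw [pvWS.eq_def, if_neg (by omega), if_neg hNp,
          ih (sp / 2).toNat (by omega) hcl rfl,
          ih (sp / 2).toNat (by omega) hcr rfl,
          show st + sp / 2 + sp / 2 = st + sp from by omega,
          PySem.List.pyRange_one_append st (st + sp / 2) (st + sp) (by omega) (by omega),
          List.map_append, List.sum_append]

theorem pvMSum {L : List Int} {N p st sp : Int} {c : Int → Int} (hN : 0 < N)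
    (hc : pvCons N p st sp) (hnn : ∀ r, 0 ≤ c r) :
    pvMF N (pvWS L N) c p =
      ((PySem.List.pyRange st (st + sp)).map
        (fun j => pvWleaf L N (N + j) * (if 0 < pvAnc c (N + j) p then 1 else 0))).sum := by
  generalize hn : sp.toNat = n
  induction n using Nat.strong_induction_on generalizing p st sp with
  | _ n ih =>
    obtain ⟨hp, hst, hpow, heq, hle⟩ := hc
    have hspp : 0 < sp := pvCons_sp_pos ⟨hp, hst, hpow, heq, hle⟩
    by_cases hsp : sp = 1
    · have hpe : p = N + st := pvCons_leaf_eq ⟨hp, hst, hpow, heq, hle⟩ hsp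
      have hanc : pvAnc c (N + st) p = c p := by
        rw [pvAnc.eq_def, if_neg (by omega), if_pos (by omega)]
      rw [pvMF.eq_def, if_neg (by omega), hsp, PySem.List.pyRange_one_singleton]
      simp only [List.map_cons, List.map_nil, List.sum_cons, List.sum_nil, add_zero, hanc]
      have hcp := hnn p
      by_cases hc0 : c p = 0
      · rw [if_pos hc0, if_pos (by omega), if_neg (by omega : ¬ 0 < c p)]
        ring
      · rw [if_neg hc0, if_pos (by omega)]
        rw [pvWS.eq_def, if_neg (by omega), if_pos (by omega), hpe]
        ring
    · have hsp2 : 2 ≤ sp := by omega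
      have hcl := pvCons_child_l ⟨hp, hst, hpow, heq, hle⟩ hsp2
      have hcr := pvCons_child_r ⟨hp, hst, hpow, heq, hle⟩ hsp2
      have hdvd : 2 ∣ sp := by
        obtain ⟨d, hd⟩ := hpow
        rcases Nat.eq_zero_or_pos d with h0 | h0
        · subst h0; norm_num at hd; omega
        · exact ⟨2 ^ (d - 1), by rw [hd, ← pow_succ']; congr 1; omega⟩
      have hNp : ¬ N ≤ p := by
        rw [pvCons_leaf_iff ⟨hp, hst, hpow, heq, hle⟩]; omega
      rw [pvMF.eq_def, if_neg (by omega), if_neg hNp]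
      by_cases hc0 : c p = 0
      · rw [if_pos hc0, ih (sp / 2).toNat (by omega) hcl rfl,
            ih (sp / 2).toNat (by omega) hcr rfl,
            show st + sp / 2 + sp / 2 = st + sp from by omega,
            PySem.List.pyRange_one_append st (st + sp / 2) (st + sp) (by omega) (by omega),
            List.map_append, List.sum_append]
        congr 1
        · congr 1
          apply List.map_congr_left
          intro j hj
          rw [PySem.List.mem_pyRange_one] at hj
          have hsubl : pvInSub (2 * p) (N + j) := pvLeafSub hcl hj.1 hj.2
          rw [pvAnc_shift hp (Or.inl rfl) hsubl, hc0, add_zero]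
        · congr 1
          apply List.map_congr_left
          intro j hj
          rw [PySem.List.mem_pyRange_one] at hj
          have hsubr : pvInSub (2 * p + 1) (N + j) :=
            pvLeafSub hcr (by omega) (by omega)
          rw [pvAnc_shift hp (Or.inr rfl) hsubr, hc0, add_zero]
      · rw [if_neg hc0, pvWSum hN ⟨hp, hst, hpow, heq, hle⟩]
        congr 1
        apply List.map_congr_left
        intro j hj
        rw [PySem.List.mem_pyRange_one] at hj
        have hsub : pvInSub p (N + j) := pvLeafSub ⟨hp, hst, hpow, heq, hle⟩ hj.1 hj.2
        have h1 := pvAnc_ge_cp hp hsub hnn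
        have h2 := hnn p
        rw [if_pos (by omega)]
        ring
theorem pvInSub_two (p : Int) : pvInSub p (2 * p) := ⟨1, 0, by ring, le_refl _, by norm_num⟩
theorem pvInSub_two' (p : Int) : pvInSub p (2 * p + 1) := ⟨1, 1, by ring, by norm_num, by norm_num⟩

theorem pvChange_spec (N : Int) (w : Int → Int) :
    ∀ (sp p st i k off : Int) (cs : (Int → Int) × (Int → Int)), 0 < p →
    ((pvChange N w cs p st sp i k off).1 = fun q => cs.1 q + off * pvDec p st sp i k q)
    ∧ (∀ q, ¬ pvInSub p q → (pvChange N w cs p st sp i k off).2 q = cs.2 q)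
    ∧ ((∀ q, pvInSub p q → cs.2 q = pvMF N w cs.1 q) →
        ∀ q, pvInSub p q →
          (pvChange N w cs p st sp i k off).2 q = pvMF N w (pvChange N w cs p st sp i k off).1 q) := by
  intro sp
  generalize hn : sp.toNat = n
  induction n using Nat.strong_induction_on generalizing sp with
  | _ n ih =>
    intro p st i k off cs hp
    by_cases hd : st + sp ≤ i ∨ k ≤ st
    · -- disjoint: no change
      have hr : pvChange N w cs p st sp i k off = cs := by rw [pvChange.eq_def, if_pos hd]
      have hdec : ∀ q, pvDec p st sp i k q = 0 := fun q => by rw [pvDec.eq_def, if_pos hd]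
      refine ⟨by funext q; rw [hr, hdec]; ring, fun q _ => by rw [hr], fun H q hq => by rw [hr]; exact H q hq⟩
    · by_cases hi : i ≤ st ∧ st + sp ≤ k
      · -- included: c[p] += off, then s[p] recomputed
        set c1 : Int → Int := Function.update cs.1 p (cs.1 p + off) with hc1
        have hdec : ∀ q, pvDec p st sp i k q = if q = p then 1 else 0 := fun q => by
          rw [pvDec.eq_def, if_neg hd, if_pos hi]
        have hr1 : (pvChange N w cs p st sp i k off).1 = c1 := by
          rw [pvChange.eq_def, if_neg hd]
          simp only [if_pos hi, ← hc1]
          split_ifs <;> rfl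
        have hcfun : c1 = fun q => cs.1 q + off * pvDec p st sp i k q := by
          funext q
          rw [hdec, hc1, Function.update_apply]
          split_ifs with h
          · rw [h]; ring
          · ring
        have hr2ne : ∀ q, q ≠ p → (pvChange N w cs p st sp i k off).2 q = cs.2 q := by
          intro q hqp
          rw [pvChange.eq_def, if_neg hd]
          simp only [if_pos hi, ← hc1]
          split_ifs <;> simp [Function.update_apply, hqp]
        have hr2p : (pvChange N w cs p st sp i k off).2 p =
            (if c1 p = 0 then (if N ≤ p then 0 else cs.2 (2 * p) + cs.2 (2 * p + 1)) else w p) := by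
          rw [pvChange.eq_def, if_neg hd]
          simp only [if_pos hi, ← hc1]
          split_ifs <;> simp [Function.update_apply]
        refine ⟨hr1.trans hcfun, fun q hq => hr2ne q (fun he => hq (he ▸ pvInSub_refl p)), ?_⟩
        intro H q hq
        rw [hr1]
        by_cases hqp : q = p
        · subst hqp
          rw [hr2p, pvMF.eq_def (c := c1), if_neg (show ¬ (q ≤ 0) by omega)]
          have hmfl : cs.2 (2 * q) = pvMF N w c1 (2 * q) := by
            rw [H (2 * q) (pvInSub_two q)]
            exact pvMF_congr_c (fun r hr => by
              rw [hc1, Function.update_apply, if_neg (fun he : r = q => by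
                have h1 := pvInSub_le (by omega : (0:Int) < 2 * q) hr
                omega)])
          have hmfr : cs.2 (2 * q + 1) = pvMF N w c1 (2 * q + 1) := by
            rw [H (2 * q + 1) (pvInSub_two' q)]
            exact pvMF_congr_c (fun r hr => by
              rw [hc1, Function.update_apply, if_neg (fun he : r = q => by
                have h1 := pvInSub_le (by omega : (0:Int) < 2 * q + 1) hr
                omega)])
          rw [hmfl, hmfr]
        · rw [hr2ne q hqp, H q hq]
          exact pvMF_congr_c (fun r hr => by
            rw [hc1, Function.update_apply, if_neg (fun he : r = p => by
              subst he
              have h1 := pvInSub_le hp hq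
              have h2 := pvInSub_le (by omega : 0 < q) hr
              omega)])
      · -- recursive case
        have hsp : 2 ≤ sp := by omega
        have hfd : PySem.Int.floordiv sp 2 = sp / 2 :=
          PySem.Int.floordiv_eq_ediv_of_pos (by norm_num : (0:Int) < 2)
        obtain ⟨A1, A2, A3⟩ := ih (sp / 2).toNat (by omega) (sp / 2) rfl (2 * p) st i k off cs (by omega : (0:Int) < 2 * p)
        set csL := pvChange N w cs (2 * p) st (sp / 2) i k off with hcsL
        obtain ⟨B1, B2, B3⟩ := ih (sp / 2).toNat (by omega) (sp / 2) rfl (2 * p + 1) (st + sp / 2) i k off csL (by omega : (0:Int) < 2 * p + 1)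
        set csR := pvChange N w csL (2 * p + 1) (st + sp / 2) (sp / 2) i k off with hcsR
        have hr : pvChange N w cs p st sp i k off =
            (if csR.1 p = 0 then
              (if N ≤ p then (csR.1, Function.update csR.2 p 0)
               else (csR.1, Function.update csR.2 p (csR.2 (2 * p) + csR.2 (2 * p + 1))))
             else (csR.1, Function.update csR.2 p (w p))) := by
          rw [pvChange.eq_def, if_neg hd]
          simp only [if_neg hi, hfd, ← hcsL, ← hcsR]
        have hr1 : (pvChange N w cs p st sp i k off).1 = csR.1 := by
          rw [hr]; split_ifs <;> rfl
        have hdec : ∀ q, pvDec p st sp i k q =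
            pvDec (2 * p) st (sp / 2) i k q + pvDec (2 * p + 1) (st + sp / 2) (sp / 2) i k q :=
          fun q => by rw [pvDec.eq_def, if_neg hd, if_neg hi, hfd]
        refine ⟨?_, ?_, ?_⟩
        · funext q
          rw [hr1]
          simp only [B1, A1]
          rw [hdec q]; ring
        · intro q hq
          have hql : ¬ pvInSub (2 * p) q := fun h => hq (pvInSub_child_l h)
          have hqr : ¬ pvInSub (2 * p + 1) q := fun h => hq (pvInSub_child_r h)
          have hqp : q ≠ p := fun he => hq (he ▸ pvInSub_refl p)
          rw [hr]
          split_ifs <;>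
            (simp only [Function.update_apply, if_neg hqp]; rw [B2 q hqr, A2 q hql])
        · intro H q hq
          have HL : ∀ r, pvInSub (2 * p) r → cs.2 r = pvMF N w cs.1 r :=
            fun r hrr => H r (pvInSub_child_l hrr)
          have A3' := A3 HL
          have HR : ∀ r, pvInSub (2 * p + 1) r → csL.2 r = pvMF N w csL.1 r := by
            intro r hrr
            rw [A2 r (fun h => pvInSub_disj hp h hrr), H r (pvInSub_child_r hrr)]
            exact pvMF_congr_c (fun r' hr' => by
              simp only [A1]
              have hz : pvDec (2 * p) st (sp / 2) i k r' = 0 := by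
                by_contra hnz
                exact pvInSub_disj hp (pvDec_support hnz) (pvInSub_trans hrr hr')
              rw [hz]; ring)
          have B3' := B3 HR
          have CL : ∀ r, pvInSub (2 * p) r → csR.2 r = pvMF N w csR.1 r := by
            intro r hrr
            rw [B2 r (fun h => pvInSub_disj hp hrr h), A3' r hrr]
            exact pvMF_congr_c (fun r' hr' => by
              simp only [B1]
              have hz : pvDec (2 * p + 1) (st + sp / 2) (sp / 2) i k r' = 0 := by
                by_contra hnz
                exact pvInSub_disj hp (pvInSub_trans hrr hr') (pvDec_support hnz)
              rw [hz]; ring)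
          have hCC : ∀ r, pvInSub p r → r ≠ p → csR.2 r = pvMF N w csR.1 r := by
            intro r hrr hne
            rcases pvInSub_split hp hrr with he | h | h
            · exact absurd he hne
            · exact CL r h
            · exact B3' r h
          rw [hr1]
          by_cases hqp : q = p
          · subst hqp
            have hL2 : csR.2 (2 * q) = pvMF N w csR.1 (2 * q) := CL _ (pvInSub_refl _)
            have hR2 : csR.2 (2 * q + 1) = pvMF N w csR.1 (2 * q + 1) := B3' _ (pvInSub_refl _)
            rw [hr, pvMF.eq_def (c := csR.1), if_neg (show ¬ (q ≤ 0) by omega)]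
            split_ifs with h1 h2
            · simp [Function.update_apply, h1, h2]
            · simp [Function.update_apply, hL2, hR2]
            · simp [Function.update_apply]
          · rw [hr]
            split_ifs <;>
              (simp only [Function.update_apply, if_neg hqp]; exact hCC q hq hqp)
theorem pvW1_spec (L : List Int) (N : Int) : ∀ (a : Int) (w : Int → Int) (q : Int), 0 ≤ a →
    ((PySem.List.pyRange a (PySem.List.len L)).foldl
      (fun w j => Function.update w (N + j) (PySem.List.pyGetD L j 0)) w) q =
    if N + a ≤ q ∧ q < N + L.length then PySem.List.pyGetD L (q - N) 0 else w q := by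
  intro a
  generalize hn : (L.length - a).toNat = n
  induction n using Nat.strong_induction_on generalizing a with
  | _ n ih =>
    intro w q ha
    rw [PySem.List.len_eq]
    by_cases hlt : a < (L.length : Int)
    · rw [PySem.List.pyRange_one_cons hlt, List.foldl_cons]
      rw [PySem.List.len_eq] at ih
      rw [ih (L.length - (a + 1)).toNat (by omega) (a + 1) rfl _ q (by omega)]
      by_cases h1 : N + (a + 1) ≤ q ∧ q < N + (L.length : Int)
      · rw [if_pos h1, if_pos (by omega)]
      · rw [if_neg h1, Function.update_apply]
        by_cases h2 : q = N + a
        · rw [if_pos h2, if_pos (by omega), h2, show N + a - N = a from by ring]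
        · rw [if_neg h2, if_neg (by omega)]
    · rw [PySem.List.pyRange_one_eq_nil (by omega), List.foldl_nil, if_neg (by omega)]

theorem pvWdown_spec (L : List Int) (N : Int) (hN : 0 < N) : ∀ (b : Int) (w : Int → Int),
    0 ≤ b → b ≤ N - 1 → (∀ q, b < q → w q = pvWS L N q) →
    ∀ q, 0 < q →
      ((PySem.List.pyRange b 0 (-1)).foldl
        (fun w p => Function.update w p (w (2 * p) + w (2 * p + 1))) w) q = pvWS L N q := by
  intro b
  generalize hn : b.toNat = n
  induction n using Nat.strong_induction_on generalizing b with
  | _ n ih =>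
    intro w hb0 hbN hw q hq
    by_cases hb : 0 < b
    · rw [PySem.List.pyRange_neg_one_cons hb, List.foldl_cons]
      refine ih (b - 1).toNat (by omega) (b - 1) rfl _ (by omega) (by omega) ?_ q hq
      intro r hr
      rw [Function.update_apply]
      split_ifs with h1
      · subst h1
        rw [hw (2 * r) (by omega), hw (2 * r + 1) (by omega),
            pvWS.eq_def (q := r), if_neg (by omega), if_neg (by omega)]
      · exact hw r (by omega)
    · rw [PySem.List.pyRange_neg_one_eq_nil (by omega), List.foldl_nil]
      exact hw q (by omega)

theorem pvCQw_eq (L : List Int) (N : Int) (hN : 0 < N) :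
    ∀ q, 0 < q → pvCQw L N q = pvWS L N q := by
  intro q hq
  unfold pvCQw
  rw [PySem.List.enumerate_eq_map_pyRange L 0, List.foldl_map]
  refine pvWdown_spec L N hN (N - 1) _ (by omega) (by omega) ?_ q hq
  intro r hr
  rw [pvW1_spec L N 0 _ r (le_refl 0), pvWS.eq_def, if_neg (show ¬ r ≤ 0 by omega),
      if_pos (show N ≤ r by omega)]
  unfold pvWleaf
  split_ifs with h1 h2 h2 <;> first | rfl | omega
-- order facts for the hand-ported tuple sort
def pvEvLe (a b : Int × Int × Int × Int) : Prop := pvEvLt b a = false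

theorem pvEvLt_iff (a b : Int × Int × Int × Int) : pvEvLt a b = true ↔
    (a.1 < b.1 ∨ (a.1 = b.1 ∧ (a.2.1 < b.2.1 ∨ (a.2.1 = b.2.1 ∧
      (a.2.2.1 < b.2.2.1 ∨ (a.2.2.1 = b.2.2.1 ∧ a.2.2.2 < b.2.2.2)))))) := by
  simp [pvEvLt, Bool.or_eq_true, Bool.and_eq_true, decide_eq_true_eq, beq_iff_eq]

theorem pvEvLt_asymm {a b : Int × Int × Int × Int} (h : pvEvLt a b = true) :
    pvEvLt b a = false := by
  rw [pvEvLt_iff] at h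
  rw [← Bool.not_eq_true, pvEvLt_iff]
  omega

theorem pvEvLt_false_trans {x y z : Int × Int × Int × Int}
    (h1 : pvEvLt x y = true) (h2 : pvEvLt z y = false) : pvEvLt z x = false := by
  rw [pvEvLt_iff] at h1
  rw [← Bool.not_eq_true, pvEvLt_iff] at h2 ⊢
  omega

theorem pvEvLe_y {a b : Int × Int × Int × Int} (h : pvEvLe a b) : a.1 ≤ b.1 := by
  rw [pvEvLe, ← Bool.not_eq_true, pvEvLt_iff] at h
  omega

theorem pvInsertBy_perm (x : Int × Int × Int × Int) (ys : List (Int × Int × Int × Int)) :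
    (PySem.List.insertBy pvEvLt x ys).Perm (x :: ys) := by
  induction ys with
  | nil => simp [PySem.List.insertBy]
  | cons y ys ih =>
    show (PySem.List.insertBy pvEvLt x (y :: ys)).Perm _
    rw [show PySem.List.insertBy pvEvLt x (y :: ys) =
        if pvEvLt x y then x :: y :: ys else y :: PySem.List.insertBy pvEvLt x ys from by
      simp [PySem.List.insertBy]]
    split_ifs
    · exact List.Perm.refl _
    · exact (ih.cons y).trans (List.Perm.swap x y ys)

theorem pvInsertBy_pairwise (x : Int × Int × Int × Int) (ys : List (Int × Int × Int × Int))
    (h : ys.Pairwise pvEvLe) : (PySem.List.insertBy pvEvLt x ys).Pairwise pvEvLe := by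
  induction ys with
  | nil => simp [PySem.List.insertBy, List.pairwise_singleton]
  | cons y ys ih =>
    rw [List.pairwise_cons] at h
    rw [show PySem.List.insertBy pvEvLt x (y :: ys) =
        if pvEvLt x y then x :: y :: ys else y :: PySem.List.insertBy pvEvLt x ys from by
      simp [PySem.List.insertBy]]
    split_ifs with hxy
    · refine List.Pairwise.cons ?_ (List.Pairwise.cons h.1 h.2)
      intro z hz
      rcases hz with _ | hz
      · exact pvEvLt_asymm hxy
      · rename_i hz
        exact pvEvLt_false_trans hxy (h.1 z hz)
    · refine List.Pairwise.cons ?_ (ih h.2)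
      intro z hz
      rcases (PySem.List.mem_insertBy _ _ _ _).mp hz with he | hz2
      · rw [he]
        rw [pvEvLe, ← Bool.not_eq_true]
        simpa using hxy
      · exact h.1 z hz2

theorem pvSortedEv_perm (xs : List (Int × Int × Int × Int)) : (pvSortedEv xs).Perm xs := by
  have key : ∀ (l acc : List (Int × Int × Int × Int)),
      (l.foldl (fun acc x => PySem.List.insertBy pvEvLt x acc) acc).Perm (l ++ acc) := by
    intro l
    induction l with
    | nil => simp
    | cons x l ih =>
      intro acc
      rw [List.foldl_cons]
      exact ((ih _).trans (List.Perm.append_left l (pvInsertBy_perm x acc))).trans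
        List.perm_middle
  simpa using key xs []

theorem pvSortedEv_pairwise (xs : List (Int × Int × Int × Int)) :
    (pvSortedEv xs).Pairwise pvEvLe := by
  have key : ∀ (l acc : List (Int × Int × Int × Int)), acc.Pairwise pvEvLe →
      (l.foldl (fun acc x => PySem.List.insertBy pvEvLt x acc) acc).Pairwise pvEvLe := by
    intro l
    induction l with
    | nil => exact fun acc h => h
    | cons x l ih => exact fun acc h => ih _ (pvInsertBy_pairwise x acc h)
  exact key xs [] (List.Pairwise.nil)
-- events of a rectangle, and the two functional counter states
def pvOpen (r : Int × Int × Int × Int) : Int × Int × Int × Int := (r.2.1, 1, r.1, r.2.2.1)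
def pvClose (r : Int × Int × Int × Int) : Int × Int × Int × Int := (r.2.2.2, -1, r.1, r.2.2.1)

def pvCA (Ix : Int → Int) (N : Int) (P : List (Int × Int × Int × Int)) : Int → Int :=
  fun q => (P.map (fun e => e.2.1 * pvDec 1 0 N (Ix e.2.2.1) (Ix e.2.2.2) q)).sum

def pvCB (Ix : Int → Int) (P : List (Int × Int × Int × Int)) : Int → Int :=
  fun j => (P.map (fun e => e.2.1 * (if Ix e.2.2.1 ≤ j ∧ j < Ix e.2.2.2 then 1 else 0))).sum

theorem pvCA_append (Ix : Int → Int) (N : Int) (P : List (Int × Int × Int × Int)) (e) :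
    pvCA Ix N (P ++ [e]) =
      fun q => pvCA Ix N P q + e.2.1 * pvDec 1 0 N (Ix e.2.2.1) (Ix e.2.2.2) q := by
  funext q; simp [pvCA]

theorem pvCB_append (Ix : Int → Int) (P : List (Int × Int × Int × Int)) (e) :
    pvCB Ix (P ++ [e]) =
      fun j => pvCB Ix P j + e.2.1 * (if Ix e.2.2.1 ≤ j ∧ j < Ix e.2.2.2 then 1 else 0) := by
  funext j; simp [pvCB]

theorem pvCA_nil (Ix : Int → Int) (N : Int) : pvCA Ix N [] = fun _ => 0 := by
  funext q; simp [pvCA]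

theorem pvCB_nil (Ix : Int → Int) : pvCB Ix [] = fun _ => 0 := by
  funext j; simp [pvCB]

-- 'for j in range(i1, i2): cnt[j] += off' is a pointwise indicator update
theorem pvCntUpd (off i2 : Int) : ∀ (i1 : Int) (c : Int → Int),
    (PySem.List.pyRange i1 i2).foldl (fun c j => Function.update c j (c j + off)) c
      = fun j => c j + off * (if i1 ≤ j ∧ j < i2 then 1 else 0) := by
  intro i1
  generalize hn : (i2 - i1).toNat = n
  induction n using Nat.strong_induction_on generalizing i1 with
  | _ n ih =>
    intro c
    by_cases hlt : i1 < i2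
    · rw [PySem.List.pyRange_one_cons hlt, List.foldl_cons,
          ih (i2 - (i1 + 1)).toNat (by omega) (i1 + 1) rfl]
      funext j
      rw [Function.update_apply]
      by_cases hji : j = i1
      · rw [if_pos hji, if_neg (by omega), if_pos (by omega), hji]; ring
      · rw [if_neg hji]
        by_cases hj2 : i1 + 1 ≤ j ∧ j < i2
        · rw [if_pos hj2, if_pos (by omega)]
        · rw [if_neg hj2, if_neg (by omega)]
    · rw [PySem.List.pyRange_one_eq_nil (by omega), List.foldl_nil]
      funext j
      rw [if_neg (by omega)]; ring

theorem pvGetDConsOne (a : Int) (ws : List Int) (m : Int) (hm : 1 ≤ m) :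
    PySem.List.pyGetD (a :: ws) m 0 = PySem.List.pyGetD ws (m - 1) 0 := by
  have h1 : m = ((m.toNat : Nat) : Int) := (Int.toNat_of_nonneg (by omega)).symm
  obtain ⟨n, hn⟩ : ∃ n : Nat, m.toNat = n + 1 := ⟨m.toNat - 1, by omega⟩
  rw [h1, hn, PySem.List.pyGetD_natCast,
      show ((((n + 1) : Nat) : Int) - 1) = ((n : Nat) : Int) from by push_cast; ring,
      PySem.List.pyGetD_natCast]
  simp

-- B's cover loop as a sum over an index range
theorem pvCovFold (ws : List Int) (cnt : Int → Int) :
    ws.zipIdx.foldl (fun t wj => if cnt (wj.2 : Int) > 0 then t + wj.1 else t) 0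
      = ((PySem.List.pyRange 0 (ws.length : Int)).map
          (fun j => if 0 < cnt j then PySem.List.pyGetD ws j 0 else 0)).sum := by
  have hb : (fun (t : Int) (wj : Int × Nat) => if cnt (wj.2 : Int) > 0 then t + wj.1 else t)
      = (fun t wj => t + (if 0 < cnt (wj.2 : Int) then wj.1 else 0)) := by
    funext t wj
    simp only [gt_iff_lt]
    split_ifs <;> ring
  rw [hb, PySem.List.foldl_add, zero_add]
  have key : ∀ (ws : List Int) (k : Nat),
      ((ws.zipIdx k).map (fun wj => if 0 < cnt (wj.2 : Int) then wj.1 else 0)).sum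
        = ((PySem.List.pyRange (k : Int) ((k : Int) + ws.length)).map
            (fun j => if 0 < cnt j then PySem.List.pyGetD ws (j - k) 0 else 0)).sum := by
    intro ws
    induction ws with
    | nil => intro k; simp [PySem.List.pyRange_one_eq_nil]
    | cons a ws ihw =>
      intro k
      rw [List.zipIdx_cons, List.map_cons, List.sum_cons,
          PySem.List.pyRange_one_cons (by push_cast [List.length_cons]; omega), List.map_cons, List.sum_cons]
      congr 1
      · rw [show ((k : Int) - k) = 0 from by ring, PySem.List.pyGetD_zero_cons]
      · rw [show ((k : Int) + (a :: ws).length) = (((k + 1 : Nat) : Int) + ws.length) from by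
              push_cast [List.length_cons]; ring,
            show ((k : Int) + 1) = ((k + 1 : Nat) : Int) from by push_cast; ring,
            ihw (k + 1)]
        apply congrArg
        apply List.map_congr_left
        intro j hj
        rw [PySem.List.mem_pyRange_one] at hj
        have hj1 : ((k : Int) + 1) ≤ j := by push_cast at hj ⊢; omega
        by_cases hc : 0 < cnt j
        · rw [if_pos hc, if_pos hc, pvGetDConsOne a ws (j - k) (by omega),
              show j - (k : Int) - 1 = j - ((k + 1 : Nat) : Int) from by push_cast; ring]
        · rw [if_neg hc, if_neg hc]
  have hk := key ws 0
  simp only [Nat.cast_zero, zero_add, sub_zero] at hk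
  exact hk

-- sum over a prefix of the event sweep = sum over the currently active rectangles
theorem pvPrefixSum {Y : Int} (G : (Int × Int × Int × Int) → Int) :
    ∀ (R : List (Int × Int × Int × Int)), (∀ r ∈ R, r.2.1 ≤ r.2.2.2) →
    (∀ r ∈ R, G (pvOpen r) + G (pvClose r) = 0) →
    (((R.flatMap (fun r => [pvOpen r, pvClose r])).filter
        (fun e => decide (e.1 < Y))).map G).sum
      = ((R.filter (fun r => decide (r.2.1 < Y) && !decide (r.2.2.2 < Y))).map
          (fun r => G (pvOpen r))).sum := by
  intro R
  induction R with
  | nil => simp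
  | cons r R ih =>
    intro hval hG
    rw [List.flatMap_cons, List.filter_append, List.map_append, List.sum_append,
        ih (fun x hx => hval x (List.mem_cons_of_mem r hx))
          (fun x hx => hG x (List.mem_cons_of_mem r hx)),
        List.filter_cons]
    have hv := hval r (List.mem_cons_self)
    have hg := hG r (List.mem_cons_self)
    by_cases h2 : r.2.2.2 < Y
    · have h1 : (pvOpen r).1 < Y := by simp only [pvOpen]; omega
      have h2' : (pvClose r).1 < Y := by simp only [pvClose]; exact h2
      simp only [List.filter_cons, List.filter_nil, decide_eq_true_eq, if_pos h1, if_pos h2']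
      simp only [List.map_cons, List.map_nil, List.sum_cons, List.sum_nil]
      rw [if_neg (by simp [h2])]
      omega
    · by_cases h1 : r.2.1 < Y
      · have h1' : (pvOpen r).1 < Y := h1
        have h2' : ¬ (pvClose r).1 < Y := h2
        simp only [List.filter_cons, List.filter_nil, decide_eq_true_eq, if_pos h1', if_neg h2']
        simp only [List.map_cons, List.map_nil, List.sum_cons, List.sum_nil]
        rw [if_pos (by simp [h1, h2])]
        simp only [List.map_cons, List.sum_cons]
        ring
      · have h1' : ¬ (pvOpen r).1 < Y := h1
        have h2' : ¬ (pvClose r).1 < Y := h2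
        simp only [List.filter_cons, List.filter_nil, decide_eq_true_eq, if_neg h1', if_neg h2']
        rw [if_neg (by simp [h1])]
        simp
theorem pvPrefixFilter {P rest : List (Int × Int × Int × Int)} {e : Int × Int × Int × Int}
    (hS : (P ++ e :: rest).Pairwise pvEvLe) (hP : ∀ a ∈ P, a.1 < e.1) :
    (P ++ e :: rest).filter (fun e' => decide (e'.1 < e.1)) = P := by
  rw [List.filter_append]
  have h1 : P.filter (fun e' => decide (e'.1 < e.1)) = P :=
    List.filter_eq_self.mpr (fun a ha => by simpa using hP a ha)
  have hrest : ∀ a ∈ rest, pvEvLe e a :=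
    (List.pairwise_cons.mp (List.pairwise_append.mp hS).2.1).1
  have h2 : (e :: rest).filter (fun e' => decide (e'.1 < e.1)) = [] := by
    rw [List.filter_eq_nil_iff]
    intro a ha
    rcases List.mem_cons.mp ha with rfl | ha2
    · simp
    · have := pvEvLe_y (hrest a ha2)
      simp only [decide_eq_true_eq]
      omega
  rw [h1, h2, List.append_nil]

theorem pvCoverEq (L : List Int) (N : Int) (w Ix : Int → Int)
    (hN : 0 < N) (hpow : ∃ t : Nat, N = 2 ^ t) (hlen : (L.length : Int) ≤ N)
    (hw : ∀ q, 0 < q → w q = pvWS L N q)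
    (R P : List (Int × Int × Int × Int)) (Y : Int)
    (hval : ∀ r ∈ R, r.2.1 ≤ r.2.2.2)
    (hPeq : ((R.flatMap (fun r => [pvOpen r, pvClose r])).filter
        (fun e' => decide (e'.1 < Y))).Perm P) :
    pvMF N w (pvCA Ix N P) 1
      = L.zipIdx.foldl (fun t wj => if (pvCB Ix P) (wj.2 : Int) > 0 then t + wj.1 else t) 0 := by
  have hCA : pvCA Ix N P = fun q =>
      ((R.filter (fun r => decide (r.2.1 < Y) && !decide (r.2.2.2 < Y))).map
        (fun r => pvDec 1 0 N (Ix r.1) (Ix r.2.2.1) q)).sum := by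
    funext q
    have hsum := pvPrefixSum (Y := Y)
      (G := fun e => e.2.1 * pvDec 1 0 N (Ix e.2.2.1) (Ix e.2.2.2) q) R hval
      (fun r _ => by simp only [pvOpen, pvClose]; ring)
    have hperm := (hPeq.map (fun e => e.2.1 * pvDec 1 0 N (Ix e.2.2.1) (Ix e.2.2.2) q)).sum_eq
    show (P.map _).sum = _
    rw [← hperm, hsum]
    apply congrArg
    apply List.map_congr_left
    intro r _
    simp only [pvOpen]
    ring
  have hCB : pvCB Ix P = fun j =>
      ((R.filter (fun r => decide (r.2.1 < Y) && !decide (r.2.2.2 < Y))).map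
        (fun r => if Ix r.1 ≤ j ∧ j < Ix r.2.2.1 then (1:Int) else 0)).sum := by
    funext j
    have hsum := pvPrefixSum (Y := Y)
      (G := fun e => e.2.1 * (if Ix e.2.2.1 ≤ j ∧ j < Ix e.2.2.2 then (1:Int) else 0)) R hval
      (fun r _ => by simp only [pvOpen, pvClose]; ring)
    have hperm := (hPeq.map
      (fun e => e.2.1 * (if Ix e.2.2.1 ≤ j ∧ j < Ix e.2.2.2 then (1:Int) else 0))).sum_eq
    show (P.map _).sum = _
    rw [← hperm, hsum]
    apply congrArg
    apply List.map_congr_left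
    intro r _
    simp only [pvOpen]
    ring
  have hnn : ∀ q, 0 ≤ pvCA Ix N P q := by
    intro q
    rw [hCA]
    exact List.sum_nonneg (fun x hx => by
      obtain ⟨r, _, rfl⟩ := List.mem_map.mp hx
      exact pvDec_nonneg _ _ _ _ _ _)
  have hanc : ∀ j, 0 ≤ j → j < N → pvAnc (pvCA Ix N P) (N + j) 1 = pvCB Ix P j := by
    intro j h0 hjN
    rw [hCA, pvAnc_listsum, hCB]
    apply congrArg
    apply List.map_congr_left
    intro r _
    exact pvAncDec hN (pvCons_root hN hpow) h0 (by omega)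
  rw [pvMF_congr_w hw, pvMSum hN (pvCons_root hN hpow) hnn, pvCovFold,
      show (0:Int) + N = N from by ring,
      PySem.List.pyRange_one_append 0 (L.length) N (by positivity) hlen,
      List.map_append, List.sum_append]
  have htail : ((PySem.List.pyRange (L.length : Int) N).map
      (fun j => pvWleaf L N (N + j) * (if 0 < pvAnc (pvCA Ix N P) (N + j) 1 then 1 else 0))).sum
        = 0 := by
    apply List.sum_eq_zero
    intro x hx
    obtain ⟨j, hj, rfl⟩ := List.mem_map.mp hx
    rw [PySem.List.mem_pyRange_one] at hj
    rw [pvWleaf, if_neg (by omega), zero_mul]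
  rw [htail, add_zero]
  apply congrArg
  apply List.map_congr_left
  intro j hj
  rw [PySem.List.mem_pyRange_one] at hj
  rw [hanc j hj.1 (by omega), pvWleaf, if_pos (by constructor <;> omega),
      show N + j - N = j from by ring]
  split_ifs
  · ring
  · ring

theorem pvFoldEq (L : List Int) (N : Int) (w Ix : Int → Int)
    (R : List (Int × Int × Int × Int))
    (hval : ∀ r ∈ R, r.2.1 ≤ r.2.2.2)
    (hN : 0 < N) (hpow : ∃ t : Nat, N = 2 ^ t) (hlen : (L.length : Int) ≤ N)
    (hw : ∀ q, 0 < q → w q = pvWS L N q) :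
    ∀ (rest P : List (Int × Int × Int × Int)),
      pvSortedEv (R.flatMap (fun r => [pvOpen r, pvClose r])) = P ++ rest →
      ∀ (area prev : Int) (cs : (Int → Int) × (Int → Int)) (cnt : Int → Int),
      cs.1 = pvCA Ix N P →
      (∀ q, 0 < q → cs.2 q = pvMF N w cs.1 q) →
      cnt = pvCB Ix P →
      (∀ a ∈ P, a.1 ≤ prev) →
      (P = [] ∨ ∃ a ∈ P, prev = a.1) →
      (rest.foldl (fun acc e =>
          (acc.1 + (e.1 - acc.2.1) * acc.2.2.2 1, e.1,
           pvChange N w acc.2.2 1 0 N (Ix e.2.2.1) (Ix e.2.2.2) e.2.1)) (area, prev, cs)).1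
      = (rest.foldl (fun acc e =>
          (acc.1 + (e.1 - acc.2.1) *
             (L.zipIdx.foldl (fun t wj => if acc.2.2 (wj.2 : Int) > 0 then t + wj.1 else t) 0),
           e.1,
           (PySem.List.pyRange (Ix e.2.2.1) (Ix e.2.2.2)).foldl
             (fun c j => Function.update c j (c j + e.2.1)) acc.2.2)) (area, prev, cnt)).1 := by
  intro rest
  induction rest with
  | nil => intro P _ area prev cs cnt _ _ _ _ _; rfl
  | cons e rest' ih =>
    intro P hsplit area prev cs cnt hc hs hcnt hprev hprevEx
    have hSp : (P ++ e :: rest').Pairwise pvEvLe := hsplit ▸ pvSortedEv_pairwise _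
    have hPe : ∀ a ∈ P, pvEvLe a e :=
      fun a ha => (List.pairwise_append.mp hSp).2.2 a ha e (List.mem_cons_self)
    rw [List.foldl_cons, List.foldl_cons]
    -- cover equality (or a zero multiplier)
    have hcov : (e.1 - prev) * cs.2 1 =
        (e.1 - prev) *
          (L.zipIdx.foldl (fun t wj => if cnt (wj.2 : Int) > 0 then t + wj.1 else t) 0) := by
      by_cases hy : e.1 = prev
      · rw [hy, sub_self, zero_mul, zero_mul]
      · have hP : ∀ a ∈ P, a.1 < e.1 := by
          intro a ha
          have h1 := hprev a ha
          rcases hprevEx with rfl | ⟨a0, ha0, he0⟩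
          · exact absurd ha (List.not_mem_nil)
          · have h2 := pvEvLe_y (hPe a0 ha0)
            omega
        have hfilter := pvPrefixFilter hSp hP
        have hperm : ((R.flatMap (fun r => [pvOpen r, pvClose r])).filter
            (fun e' => decide (e'.1 < e.1))).Perm P := by
          rw [← hfilter, ← hsplit]
          exact ((pvSortedEv_perm _).filter _).symm
        rw [hs 1 one_pos, hc, hcnt,
            pvCoverEq L N w Ix hN hpow hlen hw R P e.1 hval hperm]
    rw [hcov]
    -- step the invariants
    obtain ⟨S1, S2, S3⟩ := pvChange_spec N w N 1 0 (Ix e.2.2.1) (Ix e.2.2.2) e.2.1 cs one_pos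
    refine ih (P ++ [e]) (by rw [hsplit, List.append_assoc]; rfl) _ _ _ _ ?_ ?_ ?_ ?_ ?_
    · rw [S1, hc, pvCA_append]
    · intro q hq
      exact S3 (fun r hr => hs r (by have := pvInSub_le one_pos hr; omega)) q (pvInSub_one hq)
    · rw [pvCntUpd, hcnt, pvCB_append]
    · intro a ha
      rcases List.mem_append.mp ha with ha | ha
      · exact pvEvLe_y (hPe a ha)
      · rw [List.mem_singleton.mp ha]
    · exact Or.inr ⟨e, List.mem_append.mpr (Or.inr (List.mem_singleton.mpr rfl)), rfl⟩
theorem pvGrowN_spec : ∀ (N len : Int), 0 < N → (∃ t : Nat, N = 2 ^ t) →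
    0 < pvGrowN N len ∧ (∃ t : Nat, pvGrowN N len = 2 ^ t) ∧ len ≤ pvGrowN N len := by
  intro N len
  generalize hn : (len - N).toNat = n
  induction n using Nat.strong_induction_on generalizing N with
  | _ n ih =>
    intro hN hpow
    by_cases h : 0 < N ∧ N < len
    · rw [pvGrowN, dif_pos h]
      exact ih (len - 2 * N).toNat (by omega) (2 * N) rfl (by omega)
        (by obtain ⟨t, rfl⟩ := hpow; exact ⟨t + 1, by ring⟩)
    · rw [pvGrowN, dif_neg h]
      exact ⟨hN, hpow, by omega⟩

theorem pvPairFoldAux : ∀ (R : List (Int × Int × Int × Int)) (s : PySem.Set Int)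
    (ev : List (Int × Int × Int × Int)),
    R.foldl (fun st Rj =>
        (PySem.Set.add (PySem.Set.add st.1 Rj.1) Rj.2.2.1,
         st.2 ++ [(Rj.2.1, 1, Rj.1, Rj.2.2.1)] ++ [(Rj.2.2.2, -1, Rj.1, Rj.2.2.1)])) (s, ev)
      = (PySem.Set.update s (R.flatMap (fun r => [r.1, r.2.2.1])),
         ev ++ R.flatMap (fun r => [pvOpen r, pvClose r])) := by
  intro R
  induction R with
  | nil => intro s ev; simp [PySem.Set.update_nil]
  | cons r R ihR =>
    intro s ev
    rw [List.foldl_cons, ihR, List.flatMap_cons, List.flatMap_cons, PySem.Set.update_append,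
        PySem.Set.update_cons, PySem.Set.update_cons, PySem.Set.update_nil]
    simp [pvOpen, pvClose]

theorem pvPairFold (R : List (Int × Int × Int × Int)) :
    R.foldl (fun st Rj =>
        (PySem.Set.add (PySem.Set.add st.1 Rj.1) Rj.2.2.1,
         st.2 ++ [(Rj.2.1, 1, Rj.1, Rj.2.2.1)] ++ [(Rj.2.2.2, -1, Rj.1, Rj.2.2.1)]))
      (PySem.Set.empty, ([] : List (Int × Int × Int × Int)))
      = (PySem.Set.ofList (R.flatMap (fun r => [r.1, r.2.2.1])),
         R.flatMap (fun r => [pvOpen r, pvClose r])) := by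
  rw [pvPairFoldAux, List.nil_append]
  exact congrArg (fun z => (z, _)) (PySem.Set.update_nil_left _)


-- ===== VERDICT (by name: the statement is the Claim_ definition above) =====
theorem get_union_from_list_spec : Claim_equal_get_union_from_list := by
  intro R _ hPre
  unfold Spec_get_union_from_list
  by_cases hR : R = []
  · subst hR; rfl
  · obtain ⟨hval2, _⟩ := hPre
    have hval : ∀ r ∈ R, r.2.1 ≤ r.2.2.2 := fun r hr => (hval2 r hr).2
    unfold get_union_from_list get_union_from_list_alt
    rw [if_neg hR, if_neg hR]
    simp only [pvPairFold]
    rw [PySem.List.enumerate_eq_map_pyRange _ 0, List.foldl_map]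
    set xs := PySem.List.sorted (PySem.Set.ofList (R.flatMap (fun r => [r.1, r.2.2.1])))
      (fun x => x) with hxs
    set W := (PySem.List.pyRange 0 (PySem.List.len xs - 1)).map
      (fun i => PySem.List.pyGetD xs (i + 1) 0 - PySem.List.pyGetD xs i 0) with hW
    set N := pvGrowN 1 (PySem.List.len W) with hN0
    set D := (PySem.List.pyRange 0 (PySem.List.len xs)).foldl
      (fun d i => d.insert (PySem.List.pyGetD xs i 0) i) PySem.Dict.empty with hD
    obtain ⟨hN, hpow, hlen⟩ := pvGrowN_spec 1 (PySem.List.len W) one_pos ⟨0, rfl⟩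
    rw [PySem.List.len_eq] at hlen
    exact pvFoldEq W N (pvCQw W N) (fun x => (D.get? x).getD 0) R hval hN hpow hlen
      (pvCQw_eq W N hN)
      (pvSortedEv (R.flatMap (fun r => [pvOpen r, pvClose r]))) []
      (List.nil_append _).symm 0 0 (fun _ => 0, fun _ => 0) (fun _ => 0)
      (pvCA_nil _ _).symm
      (fun q _ => (pvMF_zero N (pvCQw W N) q).symm)
      (pvCB_nil _).symm
      (fun a ha => absurd ha (List.not_mem_nil))
      (Or.inl rfl)
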